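-- pv_equiv track=rewrite | github.com/einmalmaik/singra-vox | backend/app/permissions.py | _apply_override_layer
-- ===== SOURCE A (Python) =====
-- from typing import Dict, Iterable, Optional
--
-- DEFAULT_PERMISSIONS: Dict[str, bool] = {
--     # ── Server-Verwaltung ──────────────────────────────────────────────────────
--     "manage_server": False,        # Server-Name, Icon, Einstellungen ändern
--     "manage_channels": False,      # Kanäle erstellen, löschen, umbenennen
--     "manage_roles": False,         # Rollen erstellen, bearbeiten, löschen
--     "manage_members": False,       # Spitznamen anderer ändern
--     "kick_members": False,         # Mitglieder vom Server entfernen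
--     "ban_members": False,          # Mitglieder dauerhaft sperren
--     "manage_webhooks": False,      # Webhooks verwalten
--     "manage_emojis": False,        # Custom-Emojis verwalten
--     "create_invites": True,        # Einladungs-Links erstellen
--
--     # ── Kanal / Nachrichten ────────────────────────────────────────────────────
--     "view_channels": True,         # Kanäle sehen (Sidebar)
--     "read_messages": True,         # Nachrichten + Datei-Anhänge lesen / sehen
--     "read_message_history": True,  # Ältere Nachrichten lesen
--     "send_messages": True,         # Text-Nachrichten senden
--     "attach_files": True,          # Dateien + Bilder hochladen und senden
--     "mention_everyone": False,     # @everyone / @here verwenden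
--     "manage_messages": False,      # Nachrichten anderer löschen / bearbeiten
--     "pin_messages": False,         # Nachrichten anpinnen / auslösen
--
--     # ── Voice / Video ──────────────────────────────────────────────────────────
--     "join_voice": True,            # Voice-Kanälen beitreten
--     "speak": True,                 # Mikrofon nutzen
--     "stream": True,                # Kamera / Bildschirm teilen
--     "mute_members": False,         # Andere stumm schalten
--     "deafen_members": False,       # Andere taubstumm schalten
--     "priority_speaker": False,     # Prioritätssprecher-Status
-- }
--
-- def _normalize_override_permissions(permissions: Optional[dict]) -> dict:
--     normalized = {}
--     for permission, value in (permissions or {}).items():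
--         if permission in DEFAULT_PERMISSIONS and isinstance(value, bool):
--             normalized[permission] = value
--     return normalized
--
-- def _apply_override_layer(base_permissions: Dict[str, bool], overrides: Iterable[dict]) -> Dict[str, bool]:
--     """Wendet eine Override-Ebene via Set-Arithmetik an.
--
--     Explizite *Allow*-Einträge gewinnen immer über *Deny*-Einträge innerhalb
--     derselben Ebene – spiegelt das Verhalten von ``resolve_server_permissions``.
--     """
--     allow_set: set[str] = set()
--     deny_set: set[str] = set()
--
--     for override in overrides:
--         for permission, value in _normalize_override_permissions(override.get("permissions")).items():
--             (allow_set if value else deny_set).add(permission)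
--
--     result = {**base_permissions}
--     # Denials zuerst (niedrigere Priorität) – nur wenn kein explizites Allow vorhanden
--     for p in deny_set - allow_set:
--         result[p] = False
--     # Explizite Allows gewinnen immer (additiv)
--     for p in allow_set:
--         result[p] = True
--     return result
-- ===== SOURCE B (Python) =====
-- DEFAULT_PERMISSIONS = {
--     "manage_server": False,
--     "manage_channels": False,
--     "manage_roles": False,
--     "manage_members": False,
--     "kick_members": False,
--     "ban_members": False,
--     "manage_webhooks": False,
--     "manage_emojis": False,
--     "create_invites": True,
--     "view_channels": True,
--     "read_messages": True,
--     "read_message_history": True,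
--     "send_messages": True,
--     "attach_files": True,
--     "mention_everyone": False,
--     "manage_messages": False,
--     "pin_messages": False,
--     "join_voice": True,
--     "speak": True,
--     "stream": True,
--     "mute_members": False,
--     "deafen_members": False,
--     "priority_speaker": False,
-- }
--
--
-- def _apply_override_layer(base_permissions, overrides):
--     # Key-major strategy: flatten all normalized override entries into one
--     # stream, then decide each permission INDEPENDENTLY by scanning that
--     # stream: a mentioned permission is True iff some override allows it
--     # (allow beats deny), an unmentioned one keeps its base value.  No
--     # allow/deny sets and no accumulated override dict are ever built.
--     mentions = [(p, v) for ov in overrides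
--                 for p, v in (ov.get("permissions") or {}).items()
--                 if p in DEFAULT_PERMISSIONS and isinstance(v, bool)]
--     result = {}
--     for p, base_v in base_permissions.items():
--         hits = [v for q, v in mentions if q == p]
--         result[p] = any(hits) if hits else base_v
--     # permissions mentioned but absent from the base are appended, in
--     # first-mention order
--     for p, _ in mentions:
--         if p not in result:
--             result[p] = any(v for q, v in mentions if q == p)
--     return result
-- ===== Notes on version B (the rewrite author's own statement) =====
-- stated objective: alternative
-- what changed: Replaces A's update-major accumulation (an allow set and a deny set built over all overrides, a set difference, two output loops) by a key-major scan: the normalized override entries are flattened into one stream and each base permission is decided independently (any(hits) if mentioned, else its base value), so no allow/deny sets or merged dict are ever built.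
-- outside the precondition, e.g. on _apply_override_layer({}, [{'permissions': {'speak': False}}]): A returns {'speak': False}, B returns {'speak': False}
import Mathlib
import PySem

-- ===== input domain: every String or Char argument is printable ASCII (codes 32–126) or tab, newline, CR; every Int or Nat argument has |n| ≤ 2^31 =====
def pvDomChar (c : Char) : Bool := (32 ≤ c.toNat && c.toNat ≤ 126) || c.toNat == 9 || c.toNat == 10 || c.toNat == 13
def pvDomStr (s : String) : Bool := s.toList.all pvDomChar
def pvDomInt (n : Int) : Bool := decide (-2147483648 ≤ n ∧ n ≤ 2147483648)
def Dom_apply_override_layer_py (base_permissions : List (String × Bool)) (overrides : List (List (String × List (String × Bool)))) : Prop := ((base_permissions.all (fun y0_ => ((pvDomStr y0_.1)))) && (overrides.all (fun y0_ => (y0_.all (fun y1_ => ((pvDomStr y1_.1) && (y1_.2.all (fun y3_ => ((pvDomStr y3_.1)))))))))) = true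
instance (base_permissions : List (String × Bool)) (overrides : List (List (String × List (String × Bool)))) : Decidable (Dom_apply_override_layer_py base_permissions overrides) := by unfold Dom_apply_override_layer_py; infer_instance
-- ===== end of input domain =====

-- B decides each permission KEY-MAJOR: it flattens the normalized override entries into one
-- stream and fixes each base permission independently (any(hits) if mentioned, else base),
-- replacing A's allow/deny sets, set difference and two output loops; equivalence is on the
-- RETURN value (neither program mutates its arguments).

-- ===== PORT A =====
-- module constant DEFAULT_PERMISSIONS (shared context of both implementations)
def pvDefaults : PySem.Dict String Bool := PySem.Dict.mk
  [("manage_server", false), ("manage_channels", false), ("manage_roles", false),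
   ("manage_members", false), ("kick_members", false), ("ban_members", false),
   ("manage_webhooks", false), ("manage_emojis", false), ("create_invites", true),
   ("view_channels", true), ("read_messages", true), ("read_message_history", true),
   ("send_messages", true), ("attach_files", true), ("mention_everyone", false),
   ("manage_messages", false), ("pin_messages", false), ("join_voice", true),
   ("speak", true), ("stream", true), ("mute_members", false),
   ("deafen_members", false), ("priority_speaker", false)]

-- _normalize_override_permissions; isinstance(value, bool) is always true at this type
def pvNormalizeOverridePermissions (permissions : Option (List (String × Bool))) : PySem.Dict String Bool :=
  (permissions.getD []).foldl
    (fun normalized pv =>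
      if pvDefaults.contains pv.1 then normalized.insert pv.1 pv.2 else normalized)
    PySem.Dict.empty

def apply_override_layer_py (base_permissions : List (String × Bool)) (overrides : List (List (String × List (String × Bool)))) : List (String × Bool) :=
  let sets : PySem.Set String × PySem.Set String :=
    overrides.foldl
      (fun sets override =>
        (pvNormalizeOverridePermissions ((PySem.Dict.ofList override).get? "permissions")).items.foldl
          (fun sets pv => if pv.2 then (sets.1.add pv.1, sets.2) else (sets.1, sets.2.add pv.1))
          sets)
      (PySem.Set.empty, PySem.Set.empty)
  let result0 : PySem.Dict String Bool := PySem.Dict.ofList base_permissions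
  -- for p in deny_set - allow_set: result[p] = False   (set iteration; order-independent under Pre_)
  let result1 := (sets.2.diff sets.1).foldl (fun r p => r.insert p false) result0
  -- for p in allow_set: result[p] = True
  let result2 := sets.1.foldl (fun r p => r.insert p true) result1
  result2.items

-- ===== PORT B =====
def apply_override_layer_py_alt (base_permissions : List (String × Bool)) (overrides : List (List (String × List (String × Bool)))) : List (String × Bool) :=
  -- mentions = [(p, v) for ov in overrides for p, v in (ov.get("permissions") or {}).items() if p in DEFAULT_PERMISSIONS ...]
  let mentions : List (String × Bool) :=
    overrides.flatMap (fun ov =>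
      ((((PySem.Dict.ofList ov).get? "permissions").getD []).filter
        (fun pv => pvDefaults.contains pv.1)))
  -- for p, base_v in base_permissions.items(): result[p] = any(hits) if hits else base_v
  let result0 : PySem.Dict String Bool :=
    base_permissions.foldl
      (fun r pb =>
        let hits := (mentions.filter (fun qv => qv.1 == pb.1)).map Prod.snd
        r.insert pb.1 (if hits.isEmpty then pb.2 else hits.any id))
      PySem.Dict.empty
  -- for p, _ in mentions: if p not in result: result[p] = any(...)
  let result :=
    mentions.foldl
      (fun r pv =>
        if r.contains pv.1 then r
        else r.insert pv.1 (((mentions.filter (fun qv => qv.1 == pv.1)).map Prod.snd).any id))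
      result0
  result.items

-- ===== PRECONDITION & SPEC =====
-- Pre_ excludes (a) dict-encoded arguments with duplicate keys, which no Python dict can contain,
-- and (b) overrides naming a DEFAULT permission absent from base_permissions: A and B then return
-- the same key/value pairs, but the position of such appended keys in A's result dict is an
-- accident of Python's unspecified set iteration order.
def Pre_apply_override_layer_py (base_permissions : List (String × Bool)) (overrides : List (List (String × List (String × Bool)))) : Prop :=
  (base_permissions.map Prod.fst).Nodup ∧
  ∀ ov ∈ overrides, (ov.map Prod.fst).Nodup ∧
    ∀ p ∈ ov, (p.2.map Prod.fst).Nodup ∧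
      (p.1 = "permissions" → ∀ q ∈ p.2, pvDefaults.contains q.1 = true → q.1 ∈ base_permissions.map Prod.fst)
instance (base_permissions : List (String × Bool)) (overrides : List (List (String × List (String × Bool)))) : Decidable (Pre_apply_override_layer_py base_permissions overrides) := by unfold Pre_apply_override_layer_py; infer_instance

def pvWitness_apply_override_layer_py : (List (String × Bool)) × (List (List (String × List (String × Bool)))) :=
  ([("speak", true), ("manage_server", false), ("kick_members", false)],
   [[("permissions", [("speak", false), ("kick_members", true)])],
    [("permissions", [("kick_members", false)]), ("name", [])]])

def Spec_apply_override_layer_py (base_permissions : List (String × Bool)) (overrides : List (List (String × List (String × Bool)))) (out : List (String × Bool)) : Prop := out = apply_override_layer_py_alt base_permissions overrides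
instance (base_permissions : List (String × Bool)) (overrides : List (List (String × List (String × Bool)))) (out : List (String × Bool)) : Decidable (Spec_apply_override_layer_py base_permissions overrides out) := by unfold Spec_apply_override_layer_py; infer_instance

-- ===== CLAIM (what is proved, stated in full; the proofs are below) =====
def Claim_equal_apply_override_layer_py : Prop := ∀ (base_permissions : List (String × Bool)) (overrides : List (List (String × List (String × Bool)))), Dom_apply_override_layer_py base_permissions overrides → Pre_apply_override_layer_py base_permissions overrides → Spec_apply_override_layer_py base_permissions overrides (apply_override_layer_py base_permissions overrides)

-- ===== LEMMAS AND PROOFS =====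

-- canonical update stream: all normalized (permission, value) pairs in override order
def pvFiltered (ov : List (String × List (String × Bool))) : List (String × Bool) :=
  (((PySem.Dict.ofList ov).get? "permissions").getD []).filter (fun q => pvDefaults.contains q.1)
def pvStream (overrides : List (List (String × List (String × Bool)))) : List (String × Bool) :=
  overrides.flatMap pvFiltered

def pvStepAD (s : PySem.Set String × PySem.Set String) (pv : String × Bool) : PySem.Set String × PySem.Set String :=
  if pv.2 then (s.1.add pv.1, s.2) else (s.1, s.2.add pv.1)
def pvSets (overrides : List (List (String × List (String × Bool)))) : PySem.Set String × PySem.Set String :=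
  (pvStream overrides).foldl pvStepAD (PySem.Set.empty, PySem.Set.empty)

-- a value looked up in an ofList dict is one of the list's pairs
lemma pv_get?_ofList_mem {ν : Type} (l : List (String × ν)) (k : String) (v : ν)
    (h : (PySem.Dict.ofList l).get? k = some v) : (k, v) ∈ l := by
  induction l using List.reverseRecOn with
  | nil => simp [PySem.Dict.ofList, PySem.Dict.update] at h
  | append_singleton l p ih =>
    have he : PySem.Dict.ofList (l ++ [p]) = (PySem.Dict.ofList l).insert p.1 p.2 := by
      simp [PySem.Dict.ofList, PySem.Dict.update, List.foldl_append]
    rw [he, PySem.Dict.get?_insert] at h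
    by_cases hk : k = p.1
    · simp only [hk, if_pos] at h
      have hv : v = p.2 := by simpa using h.symm
      subst hv; subst hk
      exact List.mem_append_right _ (by simp)
    · rw [if_neg hk] at h
      exact List.mem_append_left _ (ih h)

-- normalized.items is just the filtered pair list (keys of the permissions dict are distinct)
lemma pv_normalize_items (po : Option (List (String × Bool)))
    (h : ((po.getD []).map Prod.fst).Nodup) :
    (pvNormalizeOverridePermissions po).items
      = (po.getD []).filter (fun q => pvDefaults.contains q.1) := by
  unfold pvNormalizeOverridePermissions
  rw [← List.foldl_filter]
  rw [PySem.Dict.items_foldl_insert_fresh _ Prod.fst Prod.snd PySem.Dict.empty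
    (fun a _ => PySem.Dict.contains_empty a.1)
    ((List.filter_sublist.map Prod.fst).nodup h)]
  simp [PySem.Dict.empty]

-- A's set-building double loop is the stepAD fold over the canonical stream
lemma pv_setsA_eq (base_permissions : List (String × Bool)) (overrides : List (List (String × List (String × Bool))))
    (hPre : Pre_apply_override_layer_py base_permissions overrides) :
    overrides.foldl
      (fun sets override =>
        (pvNormalizeOverridePermissions ((PySem.Dict.ofList override).get? "permissions")).items.foldl
          (fun sets pv => if pv.2 then (sets.1.add pv.1, sets.2) else (sets.1, sets.2.add pv.1))
          sets)
      (PySem.Set.empty, PySem.Set.empty) = pvSets overrides := by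
  unfold pvSets pvStream
  rw [List.foldl_flatMap]
  apply PySem.List.foldl_congr_mem
  intro acc ov hov
  cases hg : (PySem.Dict.ofList ov).get? "permissions" with
  | none =>
    rw [pv_normalize_items _ (by simp)]
    simp [pvFiltered, hg]
  | some perms =>
    have hnd : (perms.map Prod.fst).Nodup :=
      ((hPre.2 ov hov).2 _ (pv_get?_ofList_mem ov _ _ hg)).1
    rw [pv_normalize_items _ (by simpa [hg] using hnd)]
    simp only [pvFiltered, hg, Option.getD_some]
    rw [List.foldl_filter, List.foldl_filter]
    simp only [pvStepAD]

-- membership in the two sets is membership of a (k, true)/(k, false) pair in the stream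
lemma pv_mem_sets (S : List (String × Bool)) :
    ∀ (s : PySem.Set String × PySem.Set String) (k : String),
      (k ∈ (S.foldl pvStepAD s).1 ↔ k ∈ s.1 ∨ (k, true) ∈ S) ∧
      (k ∈ (S.foldl pvStepAD s).2 ↔ k ∈ s.2 ∨ (k, false) ∈ S) := by
  induction S with
  | nil => intro s k; simp
  | cons p S ih =>
    intro s k
    obtain ⟨p1, p2⟩ := p
    simp only [List.foldl_cons, List.mem_cons, Prod.mk.injEq]
    cases p2 with
    | true =>
      constructor
      · rw [(ih (pvStepAD s (p1, true)) k).1]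
        simp [pvStepAD, PySem.Set.mem_add]
        try tauto
      · rw [(ih (pvStepAD s (p1, true)) k).2]
        simp [pvStepAD]
        try tauto
    | false =>
      constructor
      · rw [(ih (pvStepAD s (p1, false)) k).1]
        simp [pvStepAD]
        try tauto
      · rw [(ih (pvStepAD s (p1, false)) k).2]
        simp [pvStepAD, PySem.Set.mem_add]
        try tauto

lemma pv_mem_allow (overrides : List (List (String × List (String × Bool)))) (k : String) :
    k ∈ (pvSets overrides).1 ↔ (k, true) ∈ pvStream overrides := by
  unfold pvSets
  rw [(pv_mem_sets (pvStream overrides) (PySem.Set.empty, PySem.Set.empty) k).1]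
  simp [PySem.Set.empty]

lemma pv_mem_deny (overrides : List (List (String × List (String × Bool)))) (k : String) :
    k ∈ (pvSets overrides).2 ↔ (k, false) ∈ pvStream overrides := by
  unfold pvSets
  rw [(pv_mem_sets (pvStream overrides) (PySem.Set.empty, PySem.Set.empty) k).2]
  simp [PySem.Set.empty]

-- under Pre_, every stream key is a key of base_permissions
lemma pv_stream_in_base (base_permissions : List (String × Bool)) (overrides : List (List (String × List (String × Bool))))
    (hPre : Pre_apply_override_layer_py base_permissions overrides) :
    ∀ k ∈ (pvStream overrides).map Prod.fst, k ∈ base_permissions.map Prod.fst := by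
  intro k hk
  simp only [pvStream, List.mem_map, List.mem_flatMap] at hk
  obtain ⟨q, ⟨ov, hov, hq⟩, rfl⟩ := hk
  simp only [pvFiltered, List.mem_filter] at hq
  obtain ⟨hqp, hcont⟩ := hq
  cases hg : (PySem.Dict.ofList ov).get? "permissions" with
  | none => rw [hg] at hqp; simp at hqp
  | some perms =>
    rw [hg] at hqp
    simp only [Option.getD_some] at hqp
    exact ((hPre.2 ov hov).2 _ (pv_get?_ofList_mem ov _ _ hg)).2 rfl q hqp hcont

lemma pv_find?_beq (l : List String) (k : String) :
    l.find? (fun x => x == k) = if k ∈ l then some k else none := by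
  induction l with
  | nil => simp
  | cons a l ih =>
    by_cases h : a = k
    · simp [h]
    · simp [h, ih, Ne.symm h]

lemma pv_contains_foldl_insert_mono (U : List (String × Bool)) (d : PySem.Dict String Bool) (k : String)
    (h : d.contains k = true) :
    (U.foldl (fun r pv => r.insert pv.1 pv.2) d).contains k = true := by
  rw [PySem.Dict.contains_iff_mem_keys] at h ⊢
  rw [PySem.Dict.keys_foldl_insert_key U Prod.fst (fun _ x => x.2) d]
  rw [PySem.Set.update_eq_append_filter]
  exact List.mem_append_left _ h

-- an insert fold whose keys all exist rewrites every base item by the LAST update for its key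
lemma pv_foldl_insert_items (U : List (String × Bool)) (d : PySem.Dict String Bool)
    (h : ∀ p ∈ U, d.contains p.1 = true) :
    (U.foldl (fun r pv => r.insert pv.1 pv.2) d).items
      = d.items.map (fun q => (q.1, ((U.reverse.find? (fun p => p.1 == q.1)).map Prod.snd).getD q.2)) := by
  induction U using List.reverseRecOn with
  | nil => simp
  | append_singleton U p ih =>
    have hU : ∀ q ∈ U, d.contains q.1 = true := fun q hq => h q (List.mem_append_left _ hq)
    have hc : (U.foldl (fun r pv => r.insert pv.1 pv.2) d).contains p.1 = true :=
      pv_contains_foldl_insert_mono U d p.1 (h p (List.mem_append_right _ (by simp)))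
    rw [List.foldl_append, List.foldl_cons, List.foldl_nil]
    rw [PySem.Dict.items_insert_of_contains _ _ hc, ih hU, List.map_map]
    refine congrFun (congrArg List.map (funext fun q => ?_)) d.items
    simp only [Function.comp_apply, List.reverse_append, List.reverse_cons, List.reverse_nil,
      List.nil_append, List.cons_append, List.find?_cons]
    by_cases hk : q.1 = p.1
    · simp [hk]
    · have : (p.1 == q.1) = false := by simp [Ne.symm hk]
      simp [this, hk]

-- an ofList dict with distinct keys has exactly its list as items
lemma pv_items_ofList (l : List (String × Bool)) (h : (l.map Prod.fst).Nodup) :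
    (PySem.Dict.ofList l).items = l := by
  have he : PySem.Dict.ofList l
      = l.foldl (fun d (p : String × Bool) => d.insert p.1 p.2) PySem.Dict.empty := by
    simp [PySem.Dict.ofList, PySem.Dict.update]
  rw [he, PySem.Dict.items_foldl_insert_fresh _ Prod.fst Prod.snd PySem.Dict.empty
    (fun a _ => PySem.Dict.contains_empty a.1) h]
  simp [PySem.Dict.empty]

-- B's append loop over mentions does nothing when every mention key already exists
lemma pv_foldl_skip_contains (S U : List (String × Bool)) (r : PySem.Dict String Bool)
    (h : ∀ p ∈ U, r.contains p.1 = true) :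
    U.foldl
      (fun r pv =>
        if r.contains pv.1 then r
        else r.insert pv.1 (((S.filter (fun qv => qv.1 == pv.1)).map Prod.snd).any id))
      r = r := by
  induction U with
  | nil => rfl
  | cons p U ih =>
    simp only [List.foldl_cons, h p (by simp), if_true]
    exact ih (fun q hq => h q (List.mem_cons_of_mem _ hq))

-- ===== VERDICT helper: the pointwise value both programs assign to a base pair =====
lemma pv_hits_mem (S : List (String × Bool)) (k : String) :
    ((S.filter (fun qv => qv.1 == k)).map Prod.snd).isEmpty = true ↔
      ¬ ((k, true) ∈ S ∨ (k, false) ∈ S) := by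
  rw [List.isEmpty_iff, List.map_eq_nil_iff, List.filter_eq_nil_iff]
  constructor
  · intro h hc
    rcases hc with hc | hc
    · exact absurd (by simp) (h _ hc)
    · exact absurd (by simp) (h _ hc)
  · intro h q hq hk
    obtain ⟨q1, q2⟩ := q
    have : q1 = k := by simpa using hk
    subst this
    cases q2
    · exact h (Or.inr hq)
    · exact h (Or.inl hq)

lemma pv_hits_any (S : List (String × Bool)) (k : String) :
    ((S.filter (fun qv => qv.1 == k)).map Prod.snd).any id = true ↔ (k, true) ∈ S := by
  rw [List.any_eq_true]
  constructor
  · rintro ⟨b, hb, hid⟩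
    simp only [List.mem_map, List.mem_filter] at hb
    obtain ⟨q, ⟨hq, hk⟩, rfl⟩ := hb
    obtain ⟨q1, q2⟩ := q
    have h1 : q1 = k := by simpa using hk
    have h2 : q2 = true := hid
    subst h1; subst h2; exact hq
  · intro h
    exact ⟨true, List.mem_map_of_mem (List.mem_filter.mpr ⟨h, by simp⟩), rfl⟩

theorem apply_override_layer_py_spec : Claim_equal_apply_override_layer_py := by
  intro base_permissions overrides _ hPre
  unfold Spec_apply_override_layer_py
  simp only [apply_override_layer_py, apply_override_layer_py_alt]
  rw [pv_setsA_eq base_permissions overrides hPre]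
  have hSrfl : overrides.flatMap (fun ov =>
      ((((PySem.Dict.ofList ov).get? "permissions").getD []).filter
        (fun pv => pvDefaults.contains pv.1))) = pvStream overrides := rfl
  rw [hSrfl]
  set S := pvStream overrides with hS
  -- base dict facts
  have hbase : ∀ k, k ∈ base_permissions.map Prod.fst →
      (PySem.Dict.ofList base_permissions).contains k = true := by
    intro k hk
    rw [PySem.Dict.contains_iff_mem_keys]
    show k ∈ (PySem.Dict.ofList base_permissions).keys
    unfold PySem.Dict.ofList PySem.Dict.update
    rw [PySem.Dict.keys_foldl_insert_key base_permissions Prod.fst (fun _ x => x.2) PySem.Dict.empty,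
      PySem.Dict.keys_empty]
    have h2 := (PySem.Set.mem_ofList (base_permissions.map Prod.fst) k).mpr hk
    rw [← PySem.Set.update_empty] at h2
    exact h2
  have hstream : ∀ p ∈ S, p.1 ∈ base_permissions.map Prod.fst := by
    intro p hp
    exact pv_stream_in_base base_permissions overrides hPre p.1 (List.mem_map_of_mem hp)
  have hallow : ∀ k ∈ (pvSets overrides).1, (PySem.Dict.ofList base_permissions).contains k = true := by
    intro k hk
    exact hbase k (hstream _ ((pv_mem_allow overrides k).mp hk))
  have hdeny : ∀ k ∈ (pvSets overrides).2, (PySem.Dict.ofList base_permissions).contains k = true := by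
    intro k hk
    exact hbase k (hstream _ ((pv_mem_deny overrides k).mp hk))
  -- A's two set-iteration output loops as one pair-insert fold
  have hset2pairs : ∀ (s : List String) (c : Bool) (d : PySem.Dict String Bool),
      s.foldl (fun r p => r.insert p c) d
        = (s.map (fun x => (x, c))).foldl (fun r pv => r.insert pv.1 pv.2) d := by
    intro s c d; rw [List.foldl_map]
  rw [hset2pairs, hset2pairs, ← List.foldl_append]
  have hUA : ∀ p ∈ (((pvSets overrides).2.diff (pvSets overrides).1).map (fun x => (x, false)) ++
      (pvSets overrides).1.map (fun x => (x, true))),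
      (PySem.Dict.ofList base_permissions).contains p.1 = true := by
    intro p hp
    rcases List.mem_append.mp hp with h | h
    · obtain ⟨x, hx, rfl⟩ := List.mem_map.mp h
      exact hdeny x ((PySem.Set.mem_diff _ _ _).mp hx).1
    · obtain ⟨x, hx, rfl⟩ := List.mem_map.mp h
      exact hallow x hx
  rw [pv_foldl_insert_items _ _ hUA, pv_items_ofList base_permissions hPre.1]
  -- B's first loop: fresh distinct keys into an empty dict
  have hB0 : (base_permissions.foldl
      (fun r pb =>
        r.insert pb.1 ((if ((S.filter (fun qv => qv.1 == pb.1)).map Prod.snd).isEmpty then pb.2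
          else ((S.filter (fun qv => qv.1 == pb.1)).map Prod.snd).any id)))
      PySem.Dict.empty).items
      = base_permissions.map (fun pb => (pb.1,
          if ((S.filter (fun qv => qv.1 == pb.1)).map Prod.snd).isEmpty then pb.2
          else ((S.filter (fun qv => qv.1 == pb.1)).map Prod.snd).any id)) := by
    rw [PySem.Dict.items_foldl_insert_fresh _ Prod.fst
      (fun pb => (if ((S.filter (fun qv => qv.1 == pb.1)).map Prod.snd).isEmpty then pb.2
          else ((S.filter (fun qv => qv.1 == pb.1)).map Prod.snd).any id)) PySem.Dict.empty
      (fun a _ => PySem.Dict.contains_empty a.1) hPre.1]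
    simp [PySem.Dict.empty]
  -- B's second loop is a no-op: every mention key is already a key of result0
  have hB0keys : ∀ p ∈ S, (base_permissions.foldl
      (fun r pb =>
        r.insert pb.1 ((if ((S.filter (fun qv => qv.1 == pb.1)).map Prod.snd).isEmpty then pb.2
          else ((S.filter (fun qv => qv.1 == pb.1)).map Prod.snd).any id)))
      PySem.Dict.empty).contains p.1 = true := by
    intro p hp
    rw [PySem.Dict.contains_iff_mem_keys,
      PySem.Dict.keys_foldl_insert_key base_permissions Prod.fst _ PySem.Dict.empty,
      PySem.Dict.keys_empty]
    have h2 : p.1 ∈ PySem.Set.ofList (base_permissions.map Prod.fst) :=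
      (PySem.Set.mem_ofList _ _).mpr (hstream p hp)
    rw [← PySem.Set.update_empty] at h2
    exact h2
  rw [pv_foldl_skip_contains S S _ hB0keys, hB0]
  -- pointwise equality of the two value assignments
  refine congrFun (congrArg List.map (funext fun q => ?_)) base_permissions
  refine Prod.ext rfl ?_
  simp only
  -- A's value via find? on the reversed append
  rw [List.reverse_append, List.find?_append, ← List.map_reverse, ← List.map_reverse,
    List.find?_map, List.find?_map]
  have h1 : (List.find? ((fun p => p.1 == q.1) ∘ fun x => (x, true)) (pvSets overrides).1.reverse)
      = if q.1 ∈ (pvSets overrides).1 then some q.1 else none := by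
    rw [show ((fun (p : String × Bool) => p.1 == q.1) ∘ fun x => (x, true)) = fun x => x == q.1 from rfl]
    simp [pv_find?_beq]
  have h2 : (List.find? ((fun p => p.1 == q.1) ∘ fun x => (x, false)) ((pvSets overrides).2.diff (pvSets overrides).1).reverse)
      = if q.1 ∈ (pvSets overrides).2.diff (pvSets overrides).1 then some q.1 else none := by
    rw [show ((fun (p : String × Bool) => p.1 == q.1) ∘ fun x => (x, false)) = fun x => x == q.1 from rfl]
    simp [pv_find?_beq]
  rw [h1, h2]
  by_cases mt : (q.1, true) ∈ S <;> by_cases mf : (q.1, false) ∈ S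
  all_goals
    simp only [pv_mem_allow, pv_mem_deny, PySem.Set.mem_diff, ← hS] at *
  · have he : ((S.filter (fun qv => qv.1 == q.1)).map Prod.snd).isEmpty = false := by
      rw [Bool.eq_false_iff, Ne, pv_hits_mem]; tauto
    have ha : ((S.filter (fun qv => qv.1 == q.1)).map Prod.snd).any id = true :=
      (pv_hits_any S q.1).mpr mt
    simp [mt, mf, he, ha]
  · have he : ((S.filter (fun qv => qv.1 == q.1)).map Prod.snd).isEmpty = false := by
      rw [Bool.eq_false_iff, Ne, pv_hits_mem]; tauto
    have ha : ((S.filter (fun qv => qv.1 == q.1)).map Prod.snd).any id = true :=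
      (pv_hits_any S q.1).mpr mt
    simp [mt, mf, he, ha]
  · have he : ((S.filter (fun qv => qv.1 == q.1)).map Prod.snd).isEmpty = false := by
      rw [Bool.eq_false_iff, Ne, pv_hits_mem]; tauto
    have ha : ((S.filter (fun qv => qv.1 == q.1)).map Prod.snd).any id = false := by
      rw [Bool.eq_false_iff, Ne, pv_hits_any]; exact mt
    simp [mt, mf, he, ha]
  · have he : ((S.filter (fun qv => qv.1 == q.1)).map Prod.snd).isEmpty = true := by
      rw [pv_hits_mem]; tauto
    simp [mt, mf, he]
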